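-- pv_equiv track=rewrite | github.com/Jin0331/rosalind | solution/Rabbits and Recurrence Relations.py | rabbit
-- ===== SOURCE A (Python) =====
-- def rabbit(m,p):
-- 	total=[]
-- 	a=1
-- 	for i in range(0,m):
-- 		if i<2:
-- 			total.append(a)
-- 		if i>1:
-- 			a=total[i-1]+(total[i-2]*p)
-- 			total.append(a)
-- 	return(a)
-- ===== SOURCE B (Python) =====
-- def rabbit(m, p):
--     # nth weighted-Fibonacci term via 2x2 matrix fast exponentiation:
--     # [[1,p],[1,0]]^n applied to (1,1); O(log m) matrix multiplications.
--     n = max(m - 1, 0)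
--     a, b, c, d = 1, 0, 0, 1          # accumulator = identity
--     x, y, z, w = 1, p, 1, 0          # base matrix M
--     while n:
--         if n & 1:
--             a, b, c, d = a*x + b*z, a*y + b*w, c*x + d*z, c*y + d*w
--         x, y, z, w = x*x + y*z, x*y + y*w, z*x + w*z, z*y + w*w
--         n >>= 1
--     return c + d
-- ===== Notes on version B (the rewrite author's own statement) =====
-- stated objective: faster
-- what changed: Replaces A's linear loop that appends every term of the recurrence to a list with 2x2 matrix exponentiation by repeated squaring of the companion matrix [[1,p],[1,0]], O(log m) matrix multiplications and O(1) space.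
import Mathlib
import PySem

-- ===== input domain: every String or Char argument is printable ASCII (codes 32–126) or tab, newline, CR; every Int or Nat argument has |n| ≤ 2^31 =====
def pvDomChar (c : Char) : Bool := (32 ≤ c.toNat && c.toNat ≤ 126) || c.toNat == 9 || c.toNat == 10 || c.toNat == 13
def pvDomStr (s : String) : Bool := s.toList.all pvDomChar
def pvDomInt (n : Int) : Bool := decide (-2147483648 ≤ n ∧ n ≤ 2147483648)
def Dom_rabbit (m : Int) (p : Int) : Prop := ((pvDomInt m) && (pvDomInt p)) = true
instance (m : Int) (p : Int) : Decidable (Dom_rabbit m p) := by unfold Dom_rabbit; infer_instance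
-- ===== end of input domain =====

-- B replaces A's linear list-building recurrence by 2x2 matrix fast exponentiation (O(log m) matrix multiplications).


-- ===== PORT A =====
-- loop body of A: state is (total, a); indices total[i-1], total[i-2] are always in range
-- (total has length i at iteration i for i ≥ 2), so `.getD 0` never supplies its default.
def rabbitStep (p : Int) (s : List Int × Int) (i : Int) : List Int × Int :=
  let total := if i < 2 then s.1 ++ [s.2] else s.1
  if i > 1 then
    let a := (PySem.List.pyGet? total (i - 1)).getD 0 +
             (PySem.List.pyGet? total (i - 2)).getD 0 * p
    (total ++ [a], a)
  else (total, s.2)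

def rabbit (m : Int) (p : Int) : Int :=
  ((PySem.List.pyRange 0 m 1).foldl (rabbitStep p) ([], 1)).2

-- ===== PORT B =====
-- 2x2 integer matrix (row-major fields a b c d)
structure Mat where
  a : Int
  b : Int
  c : Int
  d : Int
deriving DecidableEq, Repr

def mmul (x y : Mat) : Mat :=
  ⟨x.a * y.a + x.b * y.c, x.a * y.b + x.b * y.d,
   x.c * y.a + x.d * y.c, x.c * y.b + x.d * y.d⟩

-- B's while-loop: repeated squaring with an accumulator (n & 1, n >>= 1)
def powLoop (acc M : Mat) (n : Nat) : Mat :=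
  if n = 0 then acc
  else powLoop (if n % 2 = 1 then mmul acc M else acc) (mmul M M) (n / 2)
termination_by n
decreasing_by exact Nat.div_lt_self (Nat.pos_of_ne_zero (by assumption)) one_lt_two

def rabbit_alt (m : Int) (p : Int) : Int :=
  let n := (max (m - 1) 0).toNat
  let r := powLoop ⟨1, 0, 0, 1⟩ ⟨1, p, 1, 0⟩ n
  r.c + r.d

-- ===== PRECONDITION & SPEC =====
def Spec_rabbit (m : Int) (p : Int) (out : Int) : Prop := out = rabbit_alt m p
instance (m : Int) (p : Int) (out : Int) : Decidable (Spec_rabbit m p out) := by unfold Spec_rabbit; infer_instance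

-- ===== CLAIM (what is proved, stated in full; the proofs are below) =====
def Claim_equal_rabbit : Prop := ∀ (m : Int) (p : Int), Dom_rabbit m p → Spec_rabbit m p (rabbit m p)

-- ===== LEMMAS AND PROOFS =====

-- the weighted Fibonacci sequence A computes: F0 = F1 = 1, F(n+2) = F(n+1) + p*F(n)
def fibp (p : Int) : Nat → Int
  | 0 => 1
  | 1 => 1
  | n + 2 => fibp p (n + 1) + fibp p n * p

-- the companion sequence: u0 = 0, u1 = 1, u(n+2) = u(n+1) + p*u(n); fibp p n = u p (n+1)
def useq (p : Int) : Nat → Int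
  | 0 => 0
  | 1 => 1
  | n + 2 => useq p (n + 1) + useq p n * p

-- invariant of A's loop after n iterations
lemma rabbit_loop (p : Int) (n : Nat) :
    (PySem.List.pyRange 0 (n : Int) 1).foldl (rabbitStep p) ([], 1)
      = ((List.range n).map (fun k => fibp p k), fibp p (n - 1)) := by
  induction n with
  | zero => simp [PySem.List.pyRange_one_eq_nil, fibp]
  | succ n ih =>
    have h : PySem.List.pyRange 0 ((n + 1 : Nat) : Int) 1
        = PySem.List.pyRange 0 (n : Int) 1 ++ [(n : Int)] := by
      rw [show ((n + 1 : Nat) : Int) = (n : Int) + 1 by push_cast; ring]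
      exact PySem.List.pyRange_one_succ_right (by positivity)
    rw [h, List.foldl_append, ih]
    simp only [List.foldl_cons, List.foldl_nil, rabbitStep]
    rcases n with _ | _ | n
    · simp [fibp, List.range_succ]
    · simp [fibp, List.range_succ]
    · have e0 : ((n + 1 + 1 : Nat) : Int) = (n : Int) + 2 := by push_cast; ring
      have h2 : ¬ ((n : Int) + 2 < 2) := by omega
      have h1 : ((n : Int) + 2 > 1) := by omega
      rw [e0]
      simp only [if_neg h2, if_pos h1]
      have e1 : ((n : Int) + 2 - 1) = ((n + 1 : Nat) : Int) := by push_cast; ring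
      have e2 : ((n : Int) + 2 - 2) = ((n : Nat) : Int) := by omega
      rw [e1, e2, PySem.List.pyGet?_natCast, PySem.List.pyGet?_natCast]
      simp [List.range_succ, fibp]

lemma pyRange_toNat (b : Int) :
    PySem.List.pyRange 0 b 1 = PySem.List.pyRange 0 ((b.toNat : Nat) : Int) 1 := by
  rcases le_or_gt b 0 with hb | hb
  · rw [PySem.List.pyRange_one_eq_nil hb, PySem.List.pyRange_one_eq_nil (by omega)]
  · rw [Int.toNat_of_nonneg (by omega)]

lemma rabbit_eq_fibp (m p : Int) : rabbit m p = fibp p (m.toNat - 1) := by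
  unfold rabbit
  rw [pyRange_toNat, rabbit_loop]

-- matrix algebra
def matI : Mat := ⟨1, 0, 0, 1⟩
def matM (p : Int) : Mat := ⟨1, p, 1, 0⟩

def natpow (M : Mat) : Nat → Mat
  | 0 => matI
  | n + 1 => mmul (natpow M n) M

lemma mmul_assoc (x y z : Mat) : mmul (mmul x y) z = mmul x (mmul y z) := by
  simp only [mmul, Mat.mk.injEq]
  refine ⟨?_, ?_, ?_, ?_⟩ <;> ring

lemma mmul_I_right (x : Mat) : mmul x matI = x := by
  simp [mmul, matI]

lemma mmul_I_left (x : Mat) : mmul matI x = x := by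
  simp [mmul, matI]

lemma natpow_add (M : Mat) (a b : Nat) :
    natpow M (a + b) = mmul (natpow M a) (natpow M b) := by
  induction b with
  | zero => simp [natpow, mmul_I_right]
  | succ b ih => rw [show a + (b + 1) = (a + b) + 1 from rfl, natpow, ih, natpow, mmul_assoc]

lemma natpow_sq (M : Mat) (k : Nat) : natpow (mmul M M) k = natpow M (2 * k) := by
  induction k with
  | zero => simp [natpow]
  | succ k ih =>
    rw [natpow, ih, show 2 * (k + 1) = 2 * k + (1 + 1) by ring, natpow_add]
    congr 1
    simp [natpow, mmul_I_left]

lemma powLoop_eq : ∀ (n : Nat) (acc M : Mat), powLoop acc M n = mmul acc (natpow M n) := by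
  intro n
  induction n using Nat.strong_induction_on with
  | _ n ih =>
    intro acc M
    rw [powLoop]
    by_cases h : n = 0
    · subst h; simp [natpow, mmul_I_right]
    · rw [if_neg h, ih (n / 2) (Nat.div_lt_self (Nat.pos_of_ne_zero h) one_lt_two), natpow_sq]
      by_cases h2 : n % 2 = 1
      · rw [if_pos h2, mmul_assoc]
        congr 1
        have e : mmul M (natpow M (2 * (n / 2))) = natpow M (1 + 2 * (n / 2)) := by
          rw [natpow_add]
          simp [natpow, mmul_I_left]
        rw [e]
        congr 1
        omega
      · rw [if_neg h2]
        congr 1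
        congr 1
        omega

-- closed form of the matrix power in terms of useq
lemma natpow_matM (p : Int) (n : Nat) :
    natpow (matM p) n
      = ⟨useq p (n + 1), useq p n * p, useq p n, useq p (n + 1) - useq p n⟩ := by
  induction n with
  | zero => simp [natpow, matI, useq]
  | succ n ih =>
    rw [natpow, ih]
    simp only [mmul, matM]
    have : useq p (n + 2) = useq p (n + 1) + useq p n * p := rfl
    simp only [Mat.mk.injEq]
    refine ⟨?_, ?_, ?_, ?_⟩ <;> (try simp only [this]) <;> ring

lemma fibp_eq_useq (p : Int) (n : Nat) : fibp p n = useq p (n + 1) := by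
  induction n using Nat.strong_induction_on with
  | _ n ih =>
    match n with
    | 0 => rfl
    | 1 => simp [fibp, useq]
    | n + 2 =>
      show fibp p (n + 1) + fibp p n * p = useq p (n + 3)
      rw [ih (n + 1) (by omega), ih n (by omega)]
      rfl

lemma rabbit_alt_eq_fibp (m p : Int) : rabbit_alt m p = fibp p (max (m - 1) 0).toNat := by
  show (powLoop matI (matM p) (max (m - 1) 0).toNat).c
      + (powLoop matI (matM p) (max (m - 1) 0).toNat).d = _
  rw [powLoop_eq, mmul_I_left, natpow_matM, fibp_eq_useq]
  simp

-- ===== VERDICT (by name: the statement is the Claim_ definition above) =====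
theorem rabbit_spec : Claim_equal_rabbit := by
  intro m p _
  unfold Spec_rabbit
  rw [rabbit_eq_fibp, rabbit_alt_eq_fibp]
  congr 1
  omega
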